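-- pv_equiv track=rewrite | github.com/hsyhhssyy/amiyabot-game-hsyhhssyy-skill-schulte-grid | game_builder.py | try_fill_this_word
-- ===== SOURCE A (Python) =====
-- def try_fill_this_word(puzzle,word):
--
--     valid_puzzles = []
--
--     blanks = cala_blank_count(puzzle)
--     if blanks <=0:
--         return None #表示无法放置
--
--     # 从第一个空格开始遍历
--     for blank_pos in range(0,blanks):
--         x,y = get_xth_blank_pos(puzzle,blank_pos)
--         new_puzzle = puzzle_deep_copy(puzzle)
--         valid_puzzles = valid_puzzles + try_fill_this_word_at(new_puzzle,word,x,y)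
--
--     return valid_puzzles
--
-- def try_fill_this_word_at(puzzle,word,x,y):
--     # 第一个字母一定在y,x
--     new_puzzle = puzzle_deep_copy(puzzle)
--     new_puzzle[y][x] = word[0] #放入第一个单词
--
--     if len(word) == 1:
--         return [new_puzzle]
--
--     valid_puzzles = []
--     #检查四角
--     if y>0:
--         # 有 [y-1][x] 存在
--         if new_puzzle[y-1][x] == '':
--             valid_puzzles = valid_puzzles + try_fill_this_word_at(new_puzzle,word[1:len(word):],x,y-1)
--
--     if y<len(puzzle)-1:
--         # 有 [y+1][x] 存在
--         if new_puzzle[y+1][x] == '':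
--             valid_puzzles = valid_puzzles + try_fill_this_word_at(new_puzzle,word[1:len(word):],x,y+1)
--
--     if x>0:
--         # 有 [y][x-1] 存在
--         if new_puzzle[y][x-1] == '':
--             valid_puzzles = valid_puzzles + try_fill_this_word_at(new_puzzle,word[1:len(word):],x-1,y)
--
--     if x<len(puzzle)-1:
--         # 有 [y][x+1] 存在
--         if new_puzzle[y][x+1] == '':
--             valid_puzzles = valid_puzzles + try_fill_this_word_at(new_puzzle,word[1:len(word):],x+1,y)
--
--     return valid_puzzles
--
-- def get_xth_blank_pos(puzzle,xth):
--     blank_count = 0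
--     size = len(puzzle)
--     for y in range(0,size):
--         for x in range(0,size):
--             if puzzle[y][x] == '':
--                 if blank_count == xth :
--                     return x,y
--                 blank_count += 1
--
--     return -1,-1
--
-- def cala_blank_count(puzzle):
--     blank_count = 0
--     size = len(puzzle)
--     for y in range(0,size):
--         for x in range(0,size):
--             if puzzle[y][x] == '':
--                 blank_count += 1
--
--     return blank_count
--
-- def puzzle_deep_copy(puzzle):
--
--     new_puzzle = []
--     size = len(puzzle)
--     for y in range(0,size):
--         row = []
--         for x in range(0,size):
--             row.append(puzzle[y][x])
--         new_puzzle.append(row)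
--
--     return new_puzzle
-- ===== SOURCE B (Python) =====
-- def try_fill_this_word(puzzle, word):
--     # Iterative explicit-stack DFS over one row-major blank list (return value only; never mutates puzzle).
--     n = len(puzzle)
--     blanks = [(x, y) for y in range(n) for x in range(n) if puzzle[y][x] == '']
--     if not blanks:
--         return None  # no blank: cannot place
--     results = []
--     base = [[puzzle[y][x] for x in range(n)] for y in range(n)]
--     # push starting blanks in reverse so pops come in row-major order
--     stack = [(base, word, x, y) for (x, y) in reversed(blanks)]
--     while stack:
--         board, w, x, y = stack.pop()
--         board = [row[:] for row in board]
--         board[y][x] = w[0]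
--         if len(w) == 1:
--             results.append(board)
--             continue
--         rest = w[1:]
--         nbrs = []
--         if y > 0 and board[y - 1][x] == '':
--             nbrs.append((x, y - 1))
--         if y < n - 1 and board[y + 1][x] == '':
--             nbrs.append((x, y + 1))
--         if x > 0 and board[y][x - 1] == '':
--             nbrs.append((x - 1, y))
--         if x < n - 1 and board[y][x + 1] == '':
--             nbrs.append((x + 1, y))
--         # push in reverse so pops explore up, down, left, right in order
--         for nb in reversed(nbrs):
--             stack.append((board, rest) + nb)
--     return results
-- ===== Notes on version B (the rewrite author's own statement) =====
-- stated objective: alternative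
-- what changed: Collects all blank coordinates in one row-major pass (instead of counting blanks and re-scanning the grid once per blank via get_xth_blank_pos) and replaces the recursive placement with an explicit-stack iterative DFS that pushes neighbours in reverse to reproduce the recursion's exact enumeration order.
import Mathlib
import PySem

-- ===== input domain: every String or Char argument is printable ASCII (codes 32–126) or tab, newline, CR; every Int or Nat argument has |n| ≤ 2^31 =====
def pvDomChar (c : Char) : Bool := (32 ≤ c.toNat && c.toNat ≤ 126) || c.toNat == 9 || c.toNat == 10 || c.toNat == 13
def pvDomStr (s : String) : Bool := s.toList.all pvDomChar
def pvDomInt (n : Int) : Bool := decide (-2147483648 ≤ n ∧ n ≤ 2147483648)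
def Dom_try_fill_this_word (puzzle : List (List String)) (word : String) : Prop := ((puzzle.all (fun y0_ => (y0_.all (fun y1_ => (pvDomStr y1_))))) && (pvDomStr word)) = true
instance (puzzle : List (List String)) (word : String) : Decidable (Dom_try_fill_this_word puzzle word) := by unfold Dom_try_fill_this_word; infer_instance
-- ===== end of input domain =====

-- B replaces the count-and-rescan blank enumeration by one row-major blank list and the recursion
-- by an explicit-stack DFS (same enumeration order); return value only, neither side mutates its input.

-- ===== PORT A =====
-- cell accessor puzzle[y][x]; the "" default is exact wherever the Python index is in range (all of Pre_)
def pvCell (p : List (List String)) (y x : Nat) : String := (p.getD y []).getD x ""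

-- the row-major (y,x) pairs of the nested 'for y in range(n): for x in range(n)' loops
def pvCoords (n : Nat) : List (Nat × Nat) :=
  (List.range n).flatMap (fun y => (List.range n).map (fun x => (y, x)))

-- cala_blank_count
def pvCala (p : List (List String)) : Nat :=
  (List.range p.length).foldl (fun acc y =>
    (List.range p.length).foldl (fun acc x => if pvCell p y x = "" then acc + 1 else acc) acc) 0

-- get_xth_blank_pos: scan with a counter and early return; the (-1,-1) sentinel is modelled as
-- none (it is unreachable in A's call sites, where xth < blank count)
def pvGetXthGo (p : List (List String)) : List (Nat × Nat) → Nat → Nat → Option (Nat × Nat)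
  | [], _, _ => none
  | (y, x) :: rest, cnt, xth =>
    if pvCell p y x = "" then
      (if cnt = xth then some (x, y) else pvGetXthGo p rest (cnt + 1) xth)
    else pvGetXthGo p rest cnt xth

def pvGetXth (p : List (List String)) (xth : Nat) : Option (Nat × Nat) :=
  pvGetXthGo p (pvCoords p.length) 0 xth

-- puzzle_deep_copy
def pvDeepCopy (p : List (List String)) : List (List String) :=
  (List.range p.length).map (fun y => (List.range p.length).map (fun x => pvCell p y x))

-- new_puzzle[y][x] = v
def pvSet (p : List (List String)) (y x : Nat) (v : String) : List (List String) :=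
  p.set y ((p.getD y []).set x v)

-- try_fill_this_word_at (word carried as List Char; word[0] becomes the 1-char string)
def pvTryAt (p : List (List String)) (w : List Char) (x y : Nat) : List (List (List String)) :=
  match w with
  | [] => []   -- Python would raise IndexError on word[0]; unreachable under Pre_
  | c :: rest =>
    let np := pvSet (pvDeepCopy p) y x (String.ofList [c])
    if rest.isEmpty then [np]
    else
      (if 0 < y ∧ pvCell np (y-1) x = "" then pvTryAt np rest x (y-1) else []) ++
      (if y < p.length - 1 ∧ pvCell np (y+1) x = "" then pvTryAt np rest x (y+1) else []) ++
      (if 0 < x ∧ pvCell np y (x-1) = "" then pvTryAt np rest (x-1) y else []) ++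
      (if x < p.length - 1 ∧ pvCell np y (x+1) = "" then pvTryAt np rest (x+1) y else [])

def try_fill_this_word (puzzle : List (List String)) (word : String) : Option (List (List (List String))) :=
  let blanks := pvCala puzzle
  if blanks = 0 then none
  else some ((List.range blanks).foldl (fun acc i =>
    match pvGetXth puzzle i with
    | some (x, y) => acc ++ pvTryAt (pvDeepCopy puzzle) word.toList x y
    | none => acc) [])

-- ===== PORT B =====
-- [(x, y) for y in range(n) for x in range(n) if puzzle[y][x] == '']
def pvBlanks (p : List (List String)) : List (Nat × Nat) :=
  (pvCoords p.length).filterMap (fun q => if pvCell p q.1 q.2 = "" then some (q.2, q.1) else none)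

-- termination measure of the stack loop (each pop replaces a word of length k+1 by ≤ 4 of length k)
def pvMeasure (stack : List (List (List String) × List Char × Nat × Nat)) : Nat :=
  (stack.map (fun e => 5 ^ e.2.1.length)).sum

-- the two termination facts the loop below cites by name
theorem pvMeasure_tail (e : List (List String) × List Char × Nat × Nat)
    (stack : List (List (List String) × List Char × Nat × Nat)) :
    pvMeasure stack < pvMeasure (e :: stack) := by
  have : 0 < 5 ^ e.2.1.length := pow_pos (by norm_num) _
  simp only [pvMeasure, List.map_cons, List.sum_cons]
  omega

theorem pvMeasure_push (b : List (List String)) (rest : List Char) (qs : List (Nat × Nat))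
    (h : qs.length ≤ 4) (board : List (List String)) (c : Char) (x y : Nat)
    (stack : List (List (List String) × List Char × Nat × Nat)) :
    pvMeasure (qs.map (fun q => (b, rest, q.1, q.2)) ++ stack)
      < pvMeasure ((board, c :: rest, x, y) :: stack) := by
  simp only [pvMeasure, List.map_append, List.map_map, List.sum_append, List.map_cons,
    List.sum_cons, List.length_cons, pow_succ]
  have h1 : (qs.map ((fun e : List (List String) × List Char × Nat × Nat => 5 ^ e.2.1.length) ∘ fun q : Nat × Nat => (b, rest, q.1, q.2))).sum
      = qs.length * 5 ^ rest.length := by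
    rw [List.sum_eq_card_nsmul _ (5 ^ rest.length) (by
      intro z hz
      simp only [List.mem_map, Function.comp_apply] at hz
      obtain ⟨_, _, rfl⟩ := hz
      rfl)]
    simp [smul_eq_mul]
  rw [h1]
  have h2 : 0 < 5 ^ rest.length := pow_pos (by norm_num) _
  have h3 : qs.length * 5 ^ rest.length ≤ 4 * 5 ^ rest.length := Nat.mul_le_mul_right _ h
  omega

theorem pvNbrs_len {C1 C2 C3 C4 : Prop} [Decidable C1] [Decidable C2] [Decidable C3] [Decidable C4]
    (q1 q2 q3 q4 : Nat × Nat) :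
    ((dite C1 (fun _ => [q1]) (fun _ => ([] : List (Nat × Nat)))) ++
     (dite C2 (fun _ => [q2]) (fun _ => [])) ++
     (dite C3 (fun _ => [q3]) (fun _ => [])) ++
     (dite C4 (fun _ => [q4]) (fun _ => []))).length ≤ 4 := by
  split_ifs <;> simp

-- the while-stack loop; Python's per-pop row copies are identities on immutable lists;
-- pushing reversed(nbrs) so that pops come in nbrs order = prepending nbrs in order
def pvRun (n : Nat) : List (List (List String) × List Char × Nat × Nat) → List (List (List String)) → List (List (List String))
  | [], results => results
  | (board, w, x, y) :: stack, results =>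
    match w with
    | [] => pvRun n stack results  -- Python would raise on w[0]; unreachable under Pre_
    | c :: rest =>
      let b := pvSet board y x (String.ofList [c])
      if rest.isEmpty then pvRun n stack (results ++ [b])
      else
        let nbrs := (if 0 < y ∧ pvCell b (y-1) x = "" then [(x, y-1)] else []) ++
                    (if y < n-1 ∧ pvCell b (y+1) x = "" then [(x, y+1)] else []) ++
                    (if 0 < x ∧ pvCell b y (x-1) = "" then [(x-1, y)] else []) ++
                    (if x < n-1 ∧ pvCell b y (x+1) = "" then [(x+1, y)] else [])
        pvRun n (nbrs.map (fun q => (b, rest, q.1, q.2)) ++ stack) results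
  termination_by stack _ => pvMeasure stack
  decreasing_by
  · exact pvMeasure_tail _ _
  · exact pvMeasure_tail _ _
  · exact pvMeasure_push _ _ _ (pvNbrs_len _ _ _ _) _ _ _ _ _

def try_fill_this_word_alt (puzzle : List (List String)) (word : String) : Option (List (List (List String))) :=
  let n := puzzle.length
  let blanks := pvBlanks puzzle
  if blanks.isEmpty then none
  else
    let base := (List.range n).map (fun y => (List.range n).map (fun x => pvCell puzzle y x))
    some (pvRun n (blanks.map (fun q => (base, word.toList, q.1, q.2))) [])

-- ===== PRECONDITION & SPEC =====
-- Pre_ excludes exactly the inputs where the Python raises IndexError: a row shorter than the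
-- grid height (every scan indexes puzzle[y][x] for all x < len(puzzle)), and an empty word when
-- a blank exists (word[0]); A returns on every other input.
def Pre_try_fill_this_word (puzzle : List (List String)) (word : String) : Prop :=
  (∀ row ∈ puzzle, puzzle.length ≤ row.length) ∧
  (word ≠ "" ∨ ∀ row ∈ puzzle, ∀ s ∈ row.take puzzle.length, s ≠ "")
instance (puzzle : List (List String)) (word : String) : Decidable (Pre_try_fill_this_word puzzle word) := by unfold Pre_try_fill_this_word; infer_instance

def pvWitness_try_fill_this_word : List (List String) × String := ([["", "a"], ["b", ""]], "xy")

def Spec_try_fill_this_word (puzzle : List (List String)) (word : String) (out : Option (List (List (List String)))) : Prop := out = try_fill_this_word_alt puzzle word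
instance (puzzle : List (List String)) (word : String) (out : Option (List (List (List String)))) : Decidable (Spec_try_fill_this_word puzzle word out) := by unfold Spec_try_fill_this_word; infer_instance

-- ===== CLAIM (what is proved, stated in full; the proofs are below) =====
def Claim_equal_try_fill_this_word : Prop := ∀ (puzzle : List (List String)) (word : String), Dom_try_fill_this_word puzzle word → Pre_try_fill_this_word puzzle word → Spec_try_fill_this_word puzzle word (try_fill_this_word puzzle word)

-- ===== LEMMAS AND PROOFS =====

-- an n×n board
def pvWF (n : Nat) (b : List (List String)) : Prop := b.length = n ∧ ∀ r ∈ b, r.length = n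

theorem pvDeepCopy_eq {n : Nat} {b : List (List String)} (h : pvWF n b) : pvDeepCopy b = b := by
  obtain ⟨h1, h2⟩ := h
  apply List.ext_getElem
  · simp [pvDeepCopy]
  · intro y hy hy'
    simp only [pvDeepCopy, List.getElem_map, List.getElem_range]
    apply List.ext_getElem
    · simp [h2 _ (List.getElem_mem hy'), h1]
    · intro x hx hx'
      simp only [List.getElem_map, List.getElem_range]
      rw [pvCell, List.getD_eq_getElem _ _ hy', List.getD_eq_getElem _ _ hx']

theorem pvSet_WF {n : Nat} {b : List (List String)} (h : pvWF n b) (y x : Nat) (v : String) :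
    pvWF n (pvSet b y x v) := by
  obtain ⟨h1, h2⟩ := h
  by_cases hy : y < b.length
  · refine ⟨by simpa [pvSet] using h1, ?_⟩
    intro r hr
    rcases List.mem_or_eq_of_mem_set hr with h' | h'
    · exact h2 _ h'
    · subst h'
      rw [List.length_set, List.getD_eq_getElem _ _ hy]
      exact h2 _ (List.getElem_mem hy)
  · rw [pvSet, List.set_eq_of_length_le (by omega)]
    exact ⟨h1, h2⟩

theorem pvRun_push (n : Nat) (b' : List (List String)) (rest : List Char)
    (hIH : ∀ x y s res, pvRun n ((b', rest, x, y) :: s) res = pvRun n s (res ++ pvTryAt b' rest x y)) :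
    ∀ (qs : List (Nat × Nat)) s res,
      pvRun n (qs.map (fun q => (b', rest, q.1, q.2)) ++ s) res
        = pvRun n s (res ++ qs.flatMap (fun q => pvTryAt b' rest q.1 q.2)) := by
  intro qs
  induction qs with
  | nil => intro s res; simp
  | cons q t ih =>
    intro s res
    simp only [List.map_cons, List.cons_append, List.flatMap_cons]
    rw [hIH, ih, List.append_assoc]

theorem pvRun_tryAt (n : Nat) : ∀ (w : List Char) (b : List (List String)) (x y : Nat) s res,
    pvWF n b → pvRun n ((b, w, x, y) :: s) res = pvRun n s (res ++ pvTryAt b w x y) := by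
  intro w
  induction w with
  | nil =>
    intro b x y s res hb
    rw [pvRun, pvTryAt]
    simp
  | cons c rest ih =>
    intro b x y s res hb
    have hcopy := pvDeepCopy_eq hb
    have hbW := pvSet_WF hb y x (String.ofList [c])
    rw [pvRun, pvTryAt]
    simp only [hcopy, hb.1]
    by_cases hr : rest.isEmpty
    · simp only [hr, if_true]
    · simp only [hr]
      rw [pvRun_push n _ rest (fun x y s res => ih _ x y s res hbW)]
      simp only [List.flatMap_append]
      have hone : ∀ (C : Prop) [Decidable C] (q : Nat × Nat),
          ((if C then [q] else []).flatMap (fun q => pvTryAt (pvSet b y x (String.ofList [c])) rest q.1 q.2))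
            = if C then pvTryAt (pvSet b y x (String.ofList [c])) rest q.1 q.2 else [] := by
        intro C _ q
        split_ifs <;> simp
      rw [hone, hone, hone, hone]
      simp [List.append_assoc]

theorem pvGetXthGo_spec (p : List (List String)) :
    ∀ (L : List (Nat × Nat)) (cnt xth : Nat), cnt ≤ xth →
      pvGetXthGo p L cnt xth
        = (L.filterMap (fun q => if pvCell p q.1 q.2 = "" then some (q.2, q.1) else none))[xth - cnt]? := by
  intro L
  induction L with
  | nil => intro cnt xth h; simp [pvGetXthGo]
  | cons q rest ih =>
    obtain ⟨y, x⟩ := q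
    intro cnt xth h
    rw [pvGetXthGo]
    by_cases hb : pvCell p y x = ""
    · rw [if_pos hb]
      by_cases hc : cnt = xth
      · subst hc
        simp [hb]
      · have h1 : cnt + 1 ≤ xth := by omega
        have hd : xth - cnt = (xth - (cnt + 1)) + 1 := by omega
        rw [if_neg hc, ih _ _ h1, hd]
        simp [hb]
    · rw [if_neg hb, ih _ _ h]
      simp [hb]

theorem pvGetXth_eq (p : List (List String)) (i : Nat) : pvGetXth p i = (pvBlanks p)[i]? := by
  rw [pvGetXth, pvGetXthGo_spec p _ 0 i (Nat.zero_le _), Nat.sub_zero]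
  rfl

theorem pvFoldl_flatMap {α β γ : Type} (l : List α) (g : α → List β) (f : γ → β → γ) :
    ∀ (init : γ), (l.flatMap g).foldl f init = l.foldl (fun a x => (g x).foldl f a) init := by
  induction l with
  | nil => intro init; simp
  | cons q t ih => intro init; simp [List.foldl_append, ih]

theorem pvCnt_eq (p : List (List String)) :
    ∀ (l : List (Nat × Nat)) (a : Nat),
      l.foldl (fun acc q => if pvCell p q.1 q.2 = "" then acc + 1 else acc) a
        = a + (l.filterMap (fun q => if pvCell p q.1 q.2 = "" then some (q.2, q.1) else none)).length := by
  intro l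
  induction l with
  | nil => intro a; simp
  | cons q t ih =>
    intro a
    rw [List.foldl_cons, List.filterMap_cons]
    by_cases hq : pvCell p q.1 q.2 = ""
    · simp [hq, ih]
      omega
    · simp [hq, ih]

theorem pvCala_eq (p : List (List String)) : pvCala p = (pvBlanks p).length := by
  rw [pvCala, pvBlanks]
  have h1 : (List.range p.length).foldl (fun acc y =>
      (List.range p.length).foldl (fun acc x => if pvCell p y x = "" then acc + 1 else acc) acc) 0
      = (pvCoords p.length).foldl (fun acc q => if pvCell p q.1 q.2 = "" then acc + 1 else acc) 0 := by
    rw [pvCoords, pvFoldl_flatMap]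
    apply PySem.List.foldl_congr_mem
    intro a y _
    rw [List.foldl_map]
  rw [h1, pvCnt_eq, Nat.zero_add]

theorem pvFoldl_idx (p : List (List String)) (w : List Char) :
    ∀ (l : List (Nat × Nat)) (acc : List (List (List String))),
      (List.range l.length).foldl (fun acc i =>
        match l[i]? with
        | some (x, y) => acc ++ pvTryAt (pvDeepCopy p) w x y
        | none => acc) acc = acc ++ l.flatMap (fun q => pvTryAt (pvDeepCopy p) w q.1 q.2) := by
  intro l
  induction l using List.reverseRecOn with
  | nil => intro acc; simp
  | append_singleton t a ih =>
    intro acc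
    have hlen : (t ++ [a]).length = t.length + 1 := by simp
    rw [hlen, List.range_succ, List.foldl_append]
    have hcong : ∀ (acc : List (List (List String))) (i : Nat), i ∈ List.range t.length →
        (match (t ++ [a])[i]? with | some (x, y) => acc ++ pvTryAt (pvDeepCopy p) w x y | none => acc)
          = (match t[i]? with | some (x, y) => acc ++ pvTryAt (pvDeepCopy p) w x y | none => acc) := by
      intro acc i hi
      rw [List.mem_range] at hi
      rw [List.getElem?_append_left hi]
    rw [PySem.List.foldl_congr_mem (List.range t.length)
        (fun acc i => match (t ++ [a])[i]? with | some (x, y) => acc ++ pvTryAt (pvDeepCopy p) w x y | none => acc)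
        (fun acc i => match t[i]? with | some (x, y) => acc ++ pvTryAt (pvDeepCopy p) w x y | none => acc)
        acc hcong, ih]
    simp

theorem pvRun_nil (n : Nat) (res : List (List (List String))) : pvRun n [] res = res := by
  rw [pvRun]

theorem pvDeepCopy_WF (p : List (List String)) : pvWF p.length (pvDeepCopy p) := by
  constructor
  · simp [pvDeepCopy]
  · intro r hr
    rw [pvDeepCopy] at hr
    simp only [List.mem_map, List.mem_range] at hr
    obtain ⟨y, _, rfl⟩ := hr
    simp

-- ===== VERDICT (by name: the statement is the Claim_ definition above) =====
theorem try_fill_this_word_spec : Claim_equal_try_fill_this_word := by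
  intro p word _ _
  unfold Spec_try_fill_this_word try_fill_this_word try_fill_this_word_alt
  simp only [pvCala_eq]
  by_cases h0 : pvBlanks p = []
  · simp [h0]
  · rw [if_neg (by simp [h0]), if_neg (by simp [h0])]
    congr 1
    have hbody : ∀ (acc : List (List (List String))) (i : Nat), i ∈ List.range (pvBlanks p).length →
        (match pvGetXth p i with
         | some (x, y) => acc ++ pvTryAt (pvDeepCopy p) word.toList x y
         | none => acc)
          = (match (pvBlanks p)[i]? with
             | some (x, y) => acc ++ pvTryAt (pvDeepCopy p) word.toList x y
             | none => acc) := by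
      intro acc i _
      rw [pvGetXth_eq]
    rw [PySem.List.foldl_congr_mem (List.range (pvBlanks p).length)
        (fun acc i => match pvGetXth p i with
                      | some (x, y) => acc ++ pvTryAt (pvDeepCopy p) word.toList x y
                      | none => acc)
        (fun acc i => match (pvBlanks p)[i]? with
                      | some (x, y) => acc ++ pvTryAt (pvDeepCopy p) word.toList x y
                      | none => acc)
        [] hbody, pvFoldl_idx p word.toList (pvBlanks p) [], List.nil_append]
    have hIH := fun x y s res => pvRun_tryAt p.length word.toList (pvDeepCopy p) x y s res (pvDeepCopy_WF p)
    have h2 := pvRun_push p.length (pvDeepCopy p) word.toList hIH (pvBlanks p) [] []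
    rw [List.append_nil, pvRun_nil, List.nil_append] at h2
    exact h2.symm
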